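-- pv_equiv track=rewrite | github.com/Blaxav/Challenges-algo | AOC2019/Antoine/08-12-2019.py | stackingLayers
-- ===== SOURCE A (Python) =====
-- def stackingLayers(layersList, wide, tall):
--     image = '\n'
--     layersSize = wide * tall
--     for pixel in range(layersSize):
--         for layer in layersList:
--             if layer[pixel] == '2':
--                 continue
--             else:
--                 image += layer[pixel]
--                 if (pixel + 1) % 25 == 0:
--                     image += '\n'
--                 break
--     image = image.replace('0', ' ').replace('1', 'X')
--     return image
-- ===== SOURCE B (Python) =====
-- def stackingLayers(layersList, wide, tall):
--     size = wide * tall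
--     result = [None] * size
--     for layer in layersList:
--         for pixel in range(size):
--             if result[pixel] is None and layer[pixel] != '2':
--                 result[pixel] = layer[pixel]
--     image = '\n'
--     for pixel in range(size):
--         c = result[pixel]
--         if c is not None:
--             image += c
--             if (pixel + 1) % 25 == 0:
--                 image += '\n'
--     return image.replace('0', ' ').replace('1', 'X')
-- ===== Notes on version B (the rewrite author's own statement) =====
-- stated objective: alternative
-- what changed: Inverted the loop nesting: instead of scanning the layers with a break per pixel, B keeps an explicit pixel array of Optional chars filled layer-by-layer (first non-transparent layer wins), then renders the string in a second pass.
import Mathlib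
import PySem

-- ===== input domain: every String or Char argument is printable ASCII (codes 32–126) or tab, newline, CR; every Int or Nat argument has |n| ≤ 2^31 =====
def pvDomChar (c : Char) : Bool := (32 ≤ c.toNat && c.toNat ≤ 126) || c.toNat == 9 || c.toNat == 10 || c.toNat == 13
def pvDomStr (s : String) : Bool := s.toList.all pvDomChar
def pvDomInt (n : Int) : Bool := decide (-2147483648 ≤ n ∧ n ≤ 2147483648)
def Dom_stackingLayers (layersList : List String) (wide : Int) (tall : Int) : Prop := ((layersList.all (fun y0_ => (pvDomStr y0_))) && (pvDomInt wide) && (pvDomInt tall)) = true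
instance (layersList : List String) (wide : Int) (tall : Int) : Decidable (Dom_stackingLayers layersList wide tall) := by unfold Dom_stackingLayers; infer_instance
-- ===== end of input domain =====

-- B inverts A's loop nesting (layers outer, explicit Optional-pixel array, second rendering pass);
-- equal return value proved on Pre_ (inputs where A's layer[pixel] never raises IndexError).

-- ===== PORT A =====
-- inner 'for layer in layersList: … break' loop of A, for one pixel
def aScan (layers : List String) (pixel : Int) (img : String) : String :=
  match layers with
  | [] => img
  | l :: rest =>
    match PySem.Str.pyGet? l pixel with
    | none => aScan rest pixel img   -- IndexError in Python; excluded by Pre_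
    | some c =>
      if c = '2' then aScan rest pixel img
      else
        let img := img ++ c.toString
        if PySem.Int.mod (pixel + 1) 25 = 0 then img ++ "\n" else img

def stackingLayers (layersList : List String) (wide : Int) (tall : Int) : String :=
  let layersSize := wide * tall
  let image := (PySem.List.pyRange 0 layersSize 1).foldl
    (fun img pixel => aScan layersList pixel img) "\n"
  PySem.Str.replace (PySem.Str.replace image "0" " ") "1" "X"

-- ===== PORT B =====
-- body of B's inner loop: result[pixel] = layer[pixel] when still None and not transparent
def bUpdate (layer : String) (r : List (Option Char)) (pixel : Int) : List (Option Char) :=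
  match PySem.List.pyGet? r pixel with
  | none => r            -- unreachable: pixel ∈ range(size) and |r| = size
  | some cur =>
    match cur with
    | some _ => r
    | none =>
      match PySem.Str.pyGet? layer pixel with
      | none => r        -- IndexError in Python; excluded by Pre_
      | some c => if c = '2' then r else PySem.List.pySetD r pixel (some c)

-- one full pass of B's inner pixel loop over one layer
def bLayer (size : Int) (r : List (Option Char)) (layer : String) : List (Option Char) :=
  (PySem.List.pyRange 0 size 1).foldl (bUpdate layer) r

-- body of B's rendering loop
def bEmit (result : List (Option Char)) (img : String) (pixel : Int) : String :=
  match PySem.List.pyGet? result pixel with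
  | none => img
  | some cur =>
    match cur with
    | none => img
    | some c =>
      let img := img ++ c.toString
      if PySem.Int.mod (pixel + 1) 25 = 0 then img ++ "\n" else img

def stackingLayers_alt (layersList : List String) (wide : Int) (tall : Int) : String :=
  let size := wide * tall
  let result := layersList.foldl (bLayer size) (List.replicate size.toNat none)
  let image := (PySem.List.pyRange 0 size 1).foldl (bEmit result) "\n"
  PySem.Str.replace (PySem.Str.replace image "0" " ") "1" "X"

-- ===== PRECONDITION & SPEC =====
-- Pre_ holds exactly when Python A returns (no IndexError): whenever a pixel index is out
-- of range for some layer, an earlier layer already supplies a non-transparent pixel there,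
-- so A's scan never reaches the short layer.  The first two disjuncts are the degenerate
-- images; the length bound on the first layer is logically redundant (it is the i = 0 case
-- of the quantifier) and only lets the condition be decided without enumerating a huge range.
def Pre_stackingLayers (layersList : List String) (wide : Int) (tall : Int) : Prop :=
  wide * tall ≤ 0 ∨ layersList = [] ∨
    (wide * tall ≤ ((layersList.headD "").length : Int) ∧
     ∀ i ∈ PySem.List.pyRange 0 layersList.length 1,
       ∀ p ∈ PySem.List.pyRange 0 (wide * tall) 1,
         PySem.Str.pyGet? (layersList.getD i.toNat "") p = none →
         ∃ j ∈ PySem.List.pyRange 0 i 1,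
           ((PySem.Str.pyGet? (layersList.getD j.toNat "") p).any (fun c => c != '2')) = true)
instance (layersList : List String) (wide : Int) (tall : Int) : Decidable (Pre_stackingLayers layersList wide tall) := by unfold Pre_stackingLayers; infer_instance

def pvWitness_stackingLayers : List String × Int × Int := (["210022", "001122"], 3, 2)

def Spec_stackingLayers (layersList : List String) (wide : Int) (tall : Int) (out : String) : Prop := out = stackingLayers_alt layersList wide tall
instance (layersList : List String) (wide : Int) (tall : Int) (out : String) : Decidable (Spec_stackingLayers layersList wide tall out) := by unfold Spec_stackingLayers; infer_instance

-- ===== CLAIM (what is proved, stated in full; the proofs are below) =====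
def Claim_equal_stackingLayers : Prop := ∀ (layersList : List String) (wide : Int) (tall : Int), Dom_stackingLayers layersList wide tall → Pre_stackingLayers layersList wide tall → Spec_stackingLayers layersList wide tall (stackingLayers layersList wide tall)

-- ===== LEMMAS AND PROOFS =====

-- the composite value at one pixel: first in-range non-'2' char among the layers
def firstC (layers : List String) (pixel : Int) : Option Char :=
  match layers with
  | [] => none
  | l :: rest =>
    match PySem.Str.pyGet? l pixel with
    | none => firstC rest pixel
    | some c => if c = '2' then firstC rest pixel else some c

-- the effect of one layer on one pixel's state
def combine (cur : Option Char) (layer : String) (pixel : Int) : Option Char :=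
  match cur with
  | some c => some c
  | none =>
    match PySem.Str.pyGet? layer pixel with
    | none => none
    | some c => if c = '2' then none else some c

theorem aScan_eq (layers : List String) (pixel : Int) (img : String) :
    aScan layers pixel img =
      match firstC layers pixel with
      | none => img
      | some c => if PySem.Int.mod (pixel + 1) 25 = 0 then (img ++ c.toString) ++ "\n" else img ++ c.toString := by
  induction layers with
  | nil => simp [aScan, firstC]
  | cons l rest ih =>
    simp only [aScan, firstC]
    cases PySem.Str.pyGet? l pixel with
    | none => exact ih
    | some c =>
      by_cases h : c = '2' <;> simp [h, ih]

theorem length_bUpdate (layer : String) (r : List (Option Char)) (pixel : Int) :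
    (bUpdate layer r pixel).length = r.length := by
  unfold bUpdate
  cases PySem.List.pyGet? r pixel with
  | none => rfl
  | some cur =>
    cases cur with
    | some _ => rfl
    | none =>
      cases PySem.Str.pyGet? layer pixel with
      | none => rfl
      | some c => by_cases h : c = '2' <;> simp [h, PySem.List.length_pySetD]

theorem length_foldl_bUpdate (layer : String) (l : List Int) (r : List (Option Char)) :
    (l.foldl (bUpdate layer) r).length = r.length := by
  induction l generalizing r with
  | nil => rfl
  | cons p l ih => rw [List.foldl_cons, ih, length_bUpdate]

theorem bUpdate_ne (layer : String) (r : List (Option Char)) {p q : Int}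
    (hp : 0 ≤ p) (hq : 0 ≤ q) (hne : p ≠ q) :
    PySem.List.pyGet? (bUpdate layer r p) q = PySem.List.pyGet? r q := by
  unfold bUpdate
  cases PySem.List.pyGet? r p with
  | none => rfl
  | some cur =>
    cases cur with
    | some _ => rfl
    | none =>
      cases PySem.Str.pyGet? layer p with
      | none => rfl
      | some c =>
        by_cases h : c = '2'
        · simp [h]
        · simp only [h, ite_false]
          rw [PySem.List.pySetD_of_nonneg _ _ hp,
              PySem.List.pyGet?_of_nonneg _ hq, PySem.List.pyGet?_of_nonneg _ hq]
          exact List.getElem?_set_ne (by omega)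

theorem foldl_bUpdate_preserve (layer : String) {l : List Int} {q : Int}
    (hq : 0 ≤ q) (hl : ∀ p ∈ l, 0 ≤ p ∧ p ≠ q) (r : List (Option Char)) :
    PySem.List.pyGet? (l.foldl (bUpdate layer) r) q = PySem.List.pyGet? r q := by
  induction l generalizing r with
  | nil => rfl
  | cons p l ih =>
    rw [List.foldl_cons, ih (fun x hx => hl x (List.mem_cons_of_mem _ hx))]
    exact bUpdate_ne layer r (hl p (List.mem_cons_self)).1 hq (hl p (List.mem_cons_self)).2

theorem bLayer_pointwise (layer : String) (size : Int) (r : List (Option Char)) {q : Int} {cur : Option Char}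
    (hq0 : 0 ≤ q) (hqs : q < size) (hlen : r.length = size.toNat)
    (hcur : PySem.List.pyGet? r q = some cur) :
    PySem.List.pyGet? (bLayer size r layer) q = some (combine cur layer q) := by
  unfold bLayer
  rw [PySem.List.pyRange_one_append 0 q size hq0 (by omega),
      PySem.List.pyRange_one_append q (q + 1) size (by omega) (by omega),
      PySem.List.pyRange_one_singleton]
  rw [List.foldl_append, List.foldl_append]
  have h1 : PySem.List.pyGet? ((PySem.List.pyRange 0 q 1).foldl (bUpdate layer) r) q
      = some cur := by
    rw [foldl_bUpdate_preserve layer hq0 (fun p hp => by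
      rw [PySem.List.mem_pyRange_one] at hp; exact ⟨hp.1, by omega⟩) r, hcur]
  set r1 := (PySem.List.pyRange 0 q 1).foldl (bUpdate layer) r with hr1
  have hlen1 : r1.length = size.toNat := by rw [hr1, length_foldl_bUpdate, hlen]
  have hmid : PySem.List.pyGet? (List.foldl (bUpdate layer) r1 [q]) q = some (combine cur layer q) := by
    simp only [List.foldl_cons, List.foldl_nil]
    unfold bUpdate combine
    rw [h1]
    cases cur with
    | some _ => exact h1
    | none =>
      cases PySem.Str.pyGet? layer q with
      | none => exact h1
      | some c =>
        by_cases h : c = '2'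
        · simp only [h, ite_true]; exact h1
        · simp only [h, ite_false]
          rw [PySem.List.pySetD_of_nonneg _ _ hq0, PySem.List.pyGet?_of_nonneg _ hq0]
          exact List.getElem?_set_self (by omega)
  rw [foldl_bUpdate_preserve layer hq0 (fun p hp => by
    rw [PySem.List.mem_pyRange_one] at hp; exact ⟨by omega, by omega⟩)]
  exact hmid

theorem phase1_pointwise (layers : List String) (size : Int) {q : Int}
    (hq0 : 0 ≤ q) (hqs : q < size) (r : List (Option Char)) (acc : Option Char)
    (hlen : r.length = size.toNat) (hcur : PySem.List.pyGet? r q = some acc) :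
    PySem.List.pyGet? (layers.foldl (bLayer size) r) q
      = some (layers.foldl (fun a l => combine a l q) acc) := by
  induction layers generalizing r acc with
  | nil => simpa using hcur
  | cons l rest ih =>
    rw [List.foldl_cons, List.foldl_cons]
    exact ih (bLayer size r l) (combine acc l q)
      (by rw [bLayer, length_foldl_bUpdate, hlen])
      (bLayer_pointwise l size r hq0 hqs hlen hcur)

theorem foldl_combine_some (layers : List String) (q : Int) (c : Char) :
    layers.foldl (fun a l => combine a l q) (some c) = some c := by
  induction layers with
  | nil => rfl
  | cons l rest ih => simpa [combine] using ih

theorem foldl_combine_eq_firstC (layers : List String) (q : Int) :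
    layers.foldl (fun a l => combine a l q) none = firstC layers q := by
  induction layers with
  | nil => rfl
  | cons l rest ih =>
    rw [List.foldl_cons]
    cases hc : PySem.Str.pyGet? l q with
    | none =>
      rw [show combine none l q = none from by unfold combine; rw [hc]]
      rw [ih]; rw [firstC, hc]
    | some c =>
      by_cases h : c = '2'
      · rw [show combine none l q = none from by unfold combine; rw [hc]; simp [h]]
        rw [ih]; rw [firstC, hc]; simp [h]
      · rw [show combine none l q = some c from by unfold combine; rw [hc]; simp [h]]
        rw [foldl_combine_some]; rw [firstC, hc]; simp [h]

-- under no hypotheses at all, the two ports agree (A's out-of-range branch in the Lean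
-- port skips the layer, exactly as B's state machine does; Python raises there instead,
-- which Pre_ excludes)
theorem image_eq (layersList : List String) (size : Int) :
    (PySem.List.pyRange 0 size 1).foldl (fun img pixel => aScan layersList pixel img) "\n"
      = (PySem.List.pyRange 0 size 1).foldl
          (bEmit (layersList.foldl (bLayer size) (List.replicate size.toNat none))) "\n" := by
  apply PySem.List.foldl_congr_mem
  intro img pixel hp
  rw [PySem.List.mem_pyRange_one] at hp
  have hget : PySem.List.pyGet? (layersList.foldl (bLayer size) (List.replicate size.toNat none))
      pixel = some (firstC layersList pixel) := by
    rw [phase1_pointwise layersList size hp.1 hp.2 _ none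
      (by simp)
      (by rw [PySem.List.pyGet?_of_nonneg _ hp.1, List.getElem?_replicate,
              if_pos (by omega)])]
    rw [foldl_combine_eq_firstC]
  rw [aScan_eq]
  unfold bEmit
  rw [hget]

theorem ports_eq (layersList : List String) (wide tall : Int) :
    stackingLayers layersList wide tall = stackingLayers_alt layersList wide tall := by
  simp only [stackingLayers, stackingLayers_alt]
  rw [image_eq]

-- ===== VERDICT (by name: the statement is the Claim_ definition above) =====
theorem stackingLayers_spec : Claim_equal_stackingLayers := by
  intro layersList wide tall _ _
  unfold Spec_stackingLayers
  exact ports_eq layersList wide tall
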